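-- pv_equiv track=rewrite | github.com/urbao/stockoala | data_combiner.py | stockid_list
-- ===== SOURCE A (Python) =====
-- def stockid_list(period_data_list):
--     # if the item is empty, ignore
--     # if not, then compare each day data_list with the current result, see if some id is missing
--     # store all current valid stock id
--     result=['0000'] # not empty list, so for-loop will go in, and append missing stockid
--     for day in range(len(period_data_list)): # run through every day's data
--         for idx in range(len(period_data_list[day])): # run through all stock id for every day
--             for i in range(len(result)): # run through all stored id in result
--                 if str(result[i])==str(period_data_list[day][idx][0]): # matched id, so break the loop, goto next idx
--                     break
--                 elif i==len(result)-1: # already reach last i, still no matched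
--                     result.append(str(period_data_list[day][idx][0]))
--     result=sorted(result)
--     result.remove('0000')
--     return result
-- ===== SOURCE B (Python) =====
-- def stockid_list(period_data_list):
--     vals = sorted(str(rec[0]) for day in period_data_list for rec in day)
--     out = []
--     for v in vals:
--         if v != '0000' and (not out or out[-1] != v):
--             out.append(v)
--     return out
-- ===== Notes on version B (the rewrite author's own statement) =====
-- stated objective: faster
-- what changed: Replaces the nested membership-scan dedup (an inner scan of the growing result list for every record) plus sentinel-removal with flatten-then-sort followed by a single adjacency-dedup pass that skips '0000'.
import Mathlib
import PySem

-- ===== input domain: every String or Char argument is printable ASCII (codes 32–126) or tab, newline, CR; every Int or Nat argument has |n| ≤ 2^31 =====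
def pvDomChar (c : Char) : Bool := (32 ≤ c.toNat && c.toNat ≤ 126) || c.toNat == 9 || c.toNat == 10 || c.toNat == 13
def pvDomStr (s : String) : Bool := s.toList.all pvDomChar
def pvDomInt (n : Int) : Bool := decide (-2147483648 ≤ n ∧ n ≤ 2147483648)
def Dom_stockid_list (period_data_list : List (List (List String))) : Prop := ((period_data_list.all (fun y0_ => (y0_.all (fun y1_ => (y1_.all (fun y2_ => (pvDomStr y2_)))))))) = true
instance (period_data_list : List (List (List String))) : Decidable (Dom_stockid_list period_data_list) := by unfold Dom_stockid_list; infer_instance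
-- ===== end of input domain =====

-- B replaces A's nested membership-scan dedup + sentinel removal with flatten, sort, and one
-- adjacency-dedup pass skipping '0000' (objective: simpler).

-- ===== PORT A =====
-- inner 'for i in range(len(result))' loop: scan result for x; on a match break (keep result);
-- at the last index without a match, append x
def innerScanA (x : String) : List String → List String
  | [] => []
  | [r] => if r = x then [r] else [r, x]
  | r :: rest => if r = x then r :: rest else r :: innerScanA x rest

def stockid_list (period_data_list : List (List (List String))) : List String :=
  match PySem.List.remove?
      (PySem.List.sorted
        (period_data_list.foldl (fun res day =>
          day.foldl (fun res record =>
            match PySem.List.pyGet? record 0 with   -- period_data_list[day][idx][0]; none = IndexError, excluded by Pre_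
            | some x => innerScanA x res
            | none => res) res) ["0000"])
        (fun s => s) false)
      "0000" with
  | some r => r
  | none => []   -- unreachable: '0000' is always in result

-- ===== PORT B =====
def stockid_list_alt (period_data_list : List (List (List String))) : List String :=
  (PySem.List.sorted
    (period_data_list.flatMap (fun day => day.flatMap (fun record => (PySem.List.pyGet? record 0).toList)))
    (fun s => s) false).foldl
    (fun out v => if v ≠ "0000" ∧ out.getLast? ≠ some v then out ++ [v] else out) []

-- ===== PRECONDITION & SPEC =====
-- Pre_ excludes exactly the inputs holding an empty record, where Python A (and B) raise IndexError on record[0]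
def Pre_stockid_list (period_data_list : List (List (List String))) : Prop :=
  ∀ day ∈ period_data_list, ∀ record ∈ day, record ≠ []
instance (period_data_list : List (List (List String))) : Decidable (Pre_stockid_list period_data_list) := by unfold Pre_stockid_list; infer_instance
def pvWitness_stockid_list : List (List (List String)) := [[["0001"], ["0000"]], [["a"], ["0001", "x"]]]

def Spec_stockid_list (period_data_list : List (List (List String))) (out : List String) : Prop := out = stockid_list_alt period_data_list
instance (period_data_list : List (List (List String))) (out : List String) : Decidable (Spec_stockid_list period_data_list out) := by unfold Spec_stockid_list; infer_instance

-- ===== CLAIM (what is proved, stated in full; the proofs are below) =====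
def Claim_equal_stockid_list : Prop := ∀ (period_data_list : List (List (List String))), Dom_stockid_list period_data_list → Pre_stockid_list period_data_list → Spec_stockid_list period_data_list (stockid_list period_data_list)

-- ===== LEMMAS AND PROOFS =====

-- the flattened stream of ids both ports consume, in order
def pvIds (period_data_list : List (List (List String))) : List String :=
  period_data_list.flatMap (fun day => day.flatMap (fun record => (PySem.List.pyGet? record 0).toList))

-- abstract one A-step: insert-if-absent at the back
def pvIns (res : List String) (x : String) : List String := if x ∈ res then res else res ++ [x]

lemma innerScanA_eq (x : String) (res : List String) (h : res ≠ []) :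
    innerScanA x res = pvIns res x := by
  induction res with
  | nil => exact absurd rfl h
  | cons r rest ih =>
    cases rest with
    | nil =>
      by_cases hx : r = x
      · simp [innerScanA, pvIns, hx]
      · simp [innerScanA, pvIns, hx]
        exact fun h => hx h.symm
    | cons r' rest' =>
      by_cases hx : r = x
      · simp [innerScanA, pvIns, hx]
      · have := ih (by simp)
        by_cases hmem : x ∈ r' :: rest' <;>
          simp [innerScanA, pvIns, hx, hmem, Ne.symm hx] at this ⊢ <;> simp [this]

lemma pvIns_ne_nil (res : List String) (x : String) (h : res ≠ []) : pvIns res x ≠ [] := by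
  unfold pvIns; split <;> simp [h]

lemma foldl_innerScanA_eq (xs : List String) (res : List String) (h : res ≠ []) :
    xs.foldl (fun res x => innerScanA x res) res = xs.foldl pvIns res := by
  induction xs generalizing res with
  | nil => rfl
  | cons x t ih =>
    simp only [List.foldl_cons, innerScanA_eq x res h]
    exact ih _ (pvIns_ne_nil res x h)

lemma mem_foldl_pvIns (xs : List String) (res : List String) (s : String) :
    s ∈ xs.foldl pvIns res ↔ s ∈ res ∨ s ∈ xs := by
  induction xs generalizing res with
  | nil => simp
  | cons x t ih =>
    simp only [List.foldl_cons, ih, pvIns, List.mem_cons]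
    split <;> rename_i hx
    · constructor
      · rintro (h | h) <;> tauto
      · rintro (h | h | h) <;> [tauto; (subst h; tauto); tauto]
    · simp only [List.mem_append, List.mem_singleton]; tauto

lemma nodup_foldl_pvIns (xs : List String) (res : List String) (h : res.Nodup) :
    (xs.foldl pvIns res).Nodup := by
  induction xs generalizing res with
  | nil => exact h
  | cons x t ih =>
    refine ih _ ?_
    unfold pvIns; split <;> rename_i hx
    · exact h
    · rw [List.nodup_append]
      exact ⟨h, by simp, fun a ha b hb => fun e => hx (by simp at hb; subst hb; exact e ▸ ha)⟩

-- the A-side double fold is the single fold over the flattened id stream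
lemma foldA_flatten (period_data_list : List (List (List String))) (res : List String) :
    period_data_list.foldl (fun res day =>
      day.foldl (fun res record =>
        match PySem.List.pyGet? record 0 with
        | some x => innerScanA x res
        | none => res) res) res
    = (pvIds period_data_list).foldl (fun res x => innerScanA x res) res := by
  induction period_data_list generalizing res with
  | nil => rfl
  | cons day rest ih =>
    simp only [List.foldl_cons, pvIds, List.flatMap_cons, List.foldl_append, ih]
    congr 1
    induction day generalizing res with
    | nil => rfl
    | cons record drest dih =>
      simp only [List.foldl_cons, List.flatMap_cons, List.foldl_append]
      cases PySem.List.pyGet? record 0 <;> simp [dih]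

-- helper: in a strictly increasing list every element is ≤ the last
lemma le_getLast_of_pairwise_lt (l : List String) (hl : l.Pairwise (· < ·))
    (a : String) (ha : a ∈ l) (g : String) (hg : l.getLast? = some g) : a ≤ g := by
  induction l with
  | nil => cases ha
  | cons x t ih =>
    cases t with
    | nil =>
      simp at ha hg; subst ha; subst hg; rfl
    | cons y t' =>
      rw [List.getLast?_cons_cons] at hg
      rcases List.mem_cons.1 ha with h | h
      · subst h
        have hy : g ∈ y :: t' := List.mem_of_getLast? hg
        exact le_of_lt ((List.pairwise_cons.1 hl).1 g hy)
      · exact ih (List.pairwise_cons.1 hl).2 h hg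

-- the B-side dedup pass: characterisation by induction over the sorted stream
lemma dedup_fold_spec (l : List String) (out : List String)
    (hl : l.Pairwise (· ≤ ·)) (hout : out.Pairwise (· < ·)) (hz : "0000" ∉ out)
    (hle : ∀ a ∈ out, ∀ b ∈ l, a ≤ b) :
    (l.foldl (fun out v => if v ≠ "0000" ∧ out.getLast? ≠ some v then out ++ [v] else out) out).Pairwise (· < ·)
    ∧ (∀ s, s ∈ l.foldl (fun out v => if v ≠ "0000" ∧ out.getLast? ≠ some v then out ++ [v] else out) out
        ↔ s ∈ out ∨ (s ∈ l ∧ s ≠ "0000")) := by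
  induction l generalizing out with
  | nil => exact ⟨hout, by simp⟩
  | cons v t ih =>
    have hvt : ∀ b ∈ t, v ≤ b := (List.pairwise_cons.1 hl).1
    have ht : t.Pairwise (· ≤ ·) := (List.pairwise_cons.1 hl).2
    simp only [List.foldl_cons]
    by_cases hc : v ≠ "0000" ∧ out.getLast? ≠ some v
    · rw [if_pos hc]
      have hlt : ∀ a ∈ out, a < v := by
        intro a ha
        rcases hg : out.getLast? with _ | g
        · simp [List.getLast?_eq_none_iff] at hg; simp [hg] at ha
        · have hag : a ≤ g := le_getLast_of_pairwise_lt out hout a ha g hg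
          have hgout : g ∈ out := List.mem_of_getLast? hg
          have hgv : g ≤ v := hle g hgout v (List.mem_cons_self)
          have : g < v := lt_of_le_of_ne hgv (by intro h; exact hc.2 (by rw [hg, h]))
          exact lt_of_le_of_lt hag this
      have hout' : (out ++ [v]).Pairwise (· < ·) := by
        rw [List.pairwise_append]; exact ⟨hout, by simp, by simpa using hlt⟩
      have hz' : "0000" ∉ out ++ [v] := by
        simp [hz]; exact fun h => hc.1 h.symm
      have hle' : ∀ a ∈ out ++ [v], ∀ b ∈ t, a ≤ b := by
        intro a ha b hb
        rcases List.mem_append.1 ha with h | h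
        · exact hle a h b (List.mem_cons_of_mem _ hb)
        · simp at h; subst h; exact hvt b hb
      obtain ⟨h1, h2⟩ := ih (out ++ [v]) ht hout' hz' hle'
      refine ⟨h1, fun s => ?_⟩
      rw [h2 s]
      simp only [List.mem_append, List.mem_cons, List.not_mem_nil, or_false]
      constructor
      · rintro (⟨h | h⟩ | ⟨h, hns⟩)
        · exact Or.inl h
        · exact Or.inr ⟨Or.inl h, by subst h; exact hc.1⟩
        · exact Or.inr ⟨Or.inr h, hns⟩
      · rintro (h | ⟨h | h, hns⟩)
        · exact Or.inl (Or.inl h)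
        · exact Or.inl (Or.inr h)
        · exact Or.inr ⟨h, hns⟩
    · rw [if_neg hc]
      have hle' : ∀ a ∈ out, ∀ b ∈ t, a ≤ b :=
        fun a ha b hb => hle a ha b (List.mem_cons_of_mem _ hb)
      obtain ⟨h1, h2⟩ := ih out ht hout hz hle'
      refine ⟨h1, fun s => ?_⟩
      rw [h2 s]
      simp only [List.mem_cons]
      rw [not_and_or, not_not, not_not] at hc
      constructor
      · rintro (h | h) <;> tauto
      · rintro (h | ⟨h | h, hns⟩)
        · exact Or.inl h
        · subst h
          rcases hc with hv | hv
          · exact absurd hv hns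
          · exact Or.inl (List.mem_of_getLast? hv)
        · exact Or.inr ⟨h, hns⟩

-- A's result: strictly increasing, membership = ids minus '0000'
lemma stockid_list_char (pdl : List (List (List String))) :
    (stockid_list pdl).Pairwise (· < ·)
    ∧ ∀ s, s ∈ stockid_list pdl ↔ s ∈ pvIds pdl ∧ s ≠ "0000" := by
  unfold stockid_list
  rw [foldA_flatten, foldl_innerScanA_eq _ _ (by simp)]
  set R := (pvIds pdl).foldl pvIns ["0000"] with hR
  have hmemR : ∀ s, s ∈ R ↔ s = "0000" ∨ s ∈ pvIds pdl := by
    intro s; rw [hR, mem_foldl_pvIns]; simp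
  have hnodupR : R.Nodup := nodup_foldl_pvIns _ _ (by simp)
  have hzS : "0000" ∈ PySem.List.sorted R (fun s => s) false := by
    rw [PySem.List.mem_sorted]; exact (hmemR _).2 (Or.inl rfl)
  have hnodupS : (PySem.List.sorted R (fun s => s) false).Nodup :=
    (PySem.List.sorted_perm R (fun s => s) false).nodup_iff.2 hnodupR
  have hpwS : (PySem.List.sorted R (fun s => s) false).Pairwise (· < ·) := by
    have h1 := PySem.List.sorted_pairwise R (fun s => s)
    exact (h1.and hnodupS).imp (fun h => lt_of_le_of_ne h.1 h.2)
  rw [PySem.List.remove?_eq_some_erase _ _ hzS]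
  constructor
  · exact hpwS.sublist (List.erase_sublist)
  · intro s
    rw [hnodupS.mem_erase_iff, PySem.List.mem_sorted, hmemR]
    constructor
    · rintro ⟨hne, h | h⟩
      · exact absurd h hne
      · exact ⟨h, hne⟩
    · rintro ⟨h, hne⟩; exact ⟨hne, Or.inr h⟩

-- B's result: strictly increasing, same membership
lemma stockid_list_alt_char (pdl : List (List (List String))) :
    (stockid_list_alt pdl).Pairwise (· < ·)
    ∧ ∀ s, s ∈ stockid_list_alt pdl ↔ s ∈ pvIds pdl ∧ s ≠ "0000" := by
  unfold stockid_list_alt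
  have hpw : (PySem.List.sorted (pvIds pdl) (fun s => s) false).Pairwise (· ≤ ·) :=
    PySem.List.sorted_pairwise (pvIds pdl) (fun s => s)
  obtain ⟨h1, h2⟩ := dedup_fold_spec (PySem.List.sorted (pvIds pdl) (fun s => s) false) []
    hpw (by simp) (by simp) (by simp)
  simp only [pvIds] at h1 h2
  refine ⟨h1, fun s => ?_⟩
  rw [h2 s, PySem.List.mem_sorted]
  simp [pvIds]

-- two strictly increasing lists with the same membership are equal
lemma eq_of_pairwise_lt_of_mem_iff (l₁ l₂ : List String)
    (h₁ : l₁.Pairwise (· < ·)) (h₂ : l₂.Pairwise (· < ·))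
    (hmem : ∀ s, s ∈ l₁ ↔ s ∈ l₂) : l₁ = l₂ := by
  have hn₁ : l₁.Nodup := h₁.imp ne_of_lt
  have hn₂ : l₂.Nodup := h₂.imp ne_of_lt
  have hperm : l₁.Perm l₂ := (List.perm_ext_iff_of_nodup hn₁ hn₂).2 hmem
  calc l₁ = PySem.List.sorted l₂ (fun s => s) false :=
        (PySem.List.sorted_eq_of_perm_of_pairwise_lt _ _ (fun s => s) hperm h₁).symm
    _ = l₂ := PySem.List.sorted_eq_self_of_pairwise _ (fun s => s) (h₂.imp le_of_lt)

-- ===== VERDICT (by name: the statement is the Claim_ definition above) =====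
theorem stockid_list_spec : Claim_equal_stockid_list := by
  intro pdl _ _
  show stockid_list pdl = stockid_list_alt pdl
  obtain ⟨ha1, ha2⟩ := stockid_list_char pdl
  obtain ⟨hb1, hb2⟩ := stockid_list_alt_char pdl
  exact eq_of_pairwise_lt_of_mem_iff _ _ ha1 hb1 (fun s => by rw [ha2 s, hb2 s])
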